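-- pv_equiv track=rewrite | github.com/Bararide/- | magic_square.py | build_magic_square
-- ===== SOURCE A (Python) =====
-- def build_magic_square(n):
--     magic_square = [[0] * n for _ in range(n)]
--     morse_sequence = generate_morse_sequence()
--
--     for i in range(n):
--         for j in range(n):
--             morse_value = next(morse_sequence)
--             if morse_value == 0:
--                 magic_square[i][j] = i * n + j + 1
--             else:
--                 magic_square[i][j] = n * n - (i * n + j)
--
--     return magic_square
--
-- def generate_morse_sequence():
--     current_word = '0'
--     while True:
--         for bit in current_word:
--             yield int(bit)
--         current_word = invert_word(current_word)
--
-- def invert_word(word):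
--     inverted_word = ''
--     for bit in word:
--         inverted_bit = '0' if bit == '1' else '1'
--         inverted_word += inverted_bit
--     return inverted_word
-- ===== SOURCE B (Python) =====
-- def build_magic_square(n):
--     if n <= 0:
--         return []
--     total = n * n
--     flat = [k + 1 if k % 2 == 0 else total - k for k in range(total)]
--     return [flat[r * n:(r + 1) * n] for r in range(n)]
-- ===== Notes on version B (the rewrite author's own statement) =====
-- stated objective: simpler
-- what changed: Replaced the infinite word-inversion generator plus nested mutating loops by a closed-form parity formula: build the flat list of n*n values in one comprehension and slice it into rows.
import Mathlib
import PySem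

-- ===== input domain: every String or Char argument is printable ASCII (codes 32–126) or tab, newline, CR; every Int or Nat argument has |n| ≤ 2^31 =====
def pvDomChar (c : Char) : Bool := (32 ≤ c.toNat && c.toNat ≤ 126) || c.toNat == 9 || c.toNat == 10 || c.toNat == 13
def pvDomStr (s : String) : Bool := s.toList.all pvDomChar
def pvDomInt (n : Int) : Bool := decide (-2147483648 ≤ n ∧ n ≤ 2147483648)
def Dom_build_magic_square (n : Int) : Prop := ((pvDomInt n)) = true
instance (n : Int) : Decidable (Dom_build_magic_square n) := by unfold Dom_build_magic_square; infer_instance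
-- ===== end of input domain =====

-- B replaces the word-inversion generator and the nested mutating loops by a closed-form
-- parity formula: one flat list of n*n values, sliced into rows (objective: simpler).


-- ===== PORT A =====
def invert_word (word : List Char) : List Char :=
  word.foldl (fun acc bit => acc ++ [if bit = '1' then '0' else '1']) []

-- generator state: (bits of the current word still to be yielded, current_word)
def nextMorse (st : List Char × List Char) : Int × (List Char × List Char) :=
  match st with
  | (b :: rest, w) => ((if b = '1' then 1 else 0), (rest, w))
  | ([], w) =>
    match invert_word w with
    | [] => (0, ([], []))   -- unreachable: invert_word preserves length and words stay nonempty
    | b :: rest => ((if b = '1' then 1 else 0), (rest, invert_word w))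

def build_magic_square (n : Int) : List (List Int) :=
  ((PySem.List.pyRange 0 n 1).foldl
    (fun (acc : List (List Int) × (List Char × List Char)) (i : Int) =>
      let inner := (PySem.List.pyRange 0 n 1).foldl
        (fun (racc : List Int × (List Char × List Char)) (j : Int) =>
          let p := nextMorse racc.2
          (racc.1 ++ [if p.1 = 0 then i * n + j + 1 else n * n - (i * n + j)], p.2))
        ([], acc.2)
      (acc.1 ++ [inner.1], inner.2))
    ([], (['0'], ['0']))).1

-- ===== PORT B =====
def build_magic_square_alt (n : Int) : List (List Int) :=
  if n ≤ 0 then [] else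
  let total := n * n
  let flat := (PySem.List.pyRange 0 total 1).map
    (fun k => if PySem.Int.mod k 2 = 0 then k + 1 else total - k)
  (PySem.List.pyRange 0 n 1).map
    (fun r => PySem.List.slice flat (some (r * n)) (some ((r + 1) * n)))

-- ===== PRECONDITION & SPEC =====
def Spec_build_magic_square (n : Int) (out : List (List Int)) : Prop := out = build_magic_square_alt n
instance (n : Int) (out : List (List Int)) : Decidable (Spec_build_magic_square n out) := by unfold Spec_build_magic_square; infer_instance

-- ===== CLAIM (what is proved, stated in full; the proofs are below) =====
def Claim_equal_build_magic_square : Prop := ∀ (n : Int), Dom_build_magic_square n → Spec_build_magic_square n (build_magic_square n)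

-- ===== LEMMAS AND PROOFS =====

-- the generator's state after k `next` calls: 0,1,0,1,… with words alternating '0','1'
def stateAt (k : Nat) : List Char × List Char :=
  if k = 0 then (['0'], ['0']) else ([], [if k % 2 = 1 then '0' else '1'])

theorem nextMorse_stateAt (k : Nat) :
    nextMorse (stateAt k) = (((k % 2 : Nat) : Int), stateAt (k + 1)) := by
  match k with
  | 0 => decide
  | (m+1) =>
    rcases Nat.mod_two_eq_zero_or_one (m+1) with h | h
    · have h1 : (m+1+1) % 2 = 1 := by omega
      simp [stateAt, nextMorse, invert_word, h, h1]
    · have h1 : (m+1+1) % 2 = 0 := by omega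
      simp [stateAt, nextMorse, invert_word, h, h1]

theorem inner_loop (n i : Int) (N k : Nat) (row : List Int) :
    List.foldl
      (fun (x : List Int × (List Char × List Char)) (y : Nat) =>
        (x.1 ++ [if (nextMorse x.2).1 = 0 then i * n + ↑y + 1 else n * n - (i * n + ↑y)],
          (nextMorse x.2).2))
      (row, stateAt k) (List.range N)
    = (row ++ (List.range N).map
        (fun j => if (k + j) % 2 = 0 then i * n + ↑j + 1 else n * n - (i * n + ↑j)),
       stateAt (k + N)) := by
  induction N with
  | zero => simp
  | succ N ih =>
    rw [List.range_succ, List.foldl_append, ih, List.map_append]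
    simp only [List.foldl_cons, List.foldl_nil, nextMorse_stateAt (k + N)]
    have h2 : (2 ∣ ((k:Int) + (N:Int))) ↔ ((k + N) % 2 = 0) := by omega
    rw [show k + (N + 1) = (k + N) + 1 from rfl]
    simp [h2, List.append_assoc]

theorem outer_loop (N M k : Nat) (rows : List (List Int)) :
    List.foldl
      (fun (x : List (List Int) × (List Char × List Char)) (y : Nat) =>
        (x.1 ++
            [(List.foldl
                  (fun (x1 : List Int × (List Char × List Char)) (y1 : Nat) =>
                    (x1.1 ++ [if (nextMorse x1.2).1 = 0 then (y:Int) * (N:Int) + (y1:Int) + 1 else ((N:Nat):Int) * ((N:Nat):Int) - ((y:Int) * (N:Int) + (y1:Int))],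
                      (nextMorse x1.2).2))
                  ([], x.2) (List.range N)).1],
          (List.foldl
              (fun (x1 : List Int × (List Char × List Char)) (y1 : Nat) =>
                (x1.1 ++ [if (nextMorse x1.2).1 = 0 then (y:Int) * (N:Int) + (y1:Int) + 1 else ((N:Nat):Int) * ((N:Nat):Int) - ((y:Int) * (N:Int) + (y1:Int))],
                  (nextMorse x1.2).2))
              ([], x.2) (List.range N)).2))
      (rows, stateAt k) (List.range M)
    = (rows ++ (List.range M).map
        (fun i => (List.range N).map
          (fun j => if (k + i * N + j) % 2 = 0 then (i:Int) * ↑N + ↑j + 1 else (N:Int) * ↑N - (↑i * ↑N + ↑j))),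
       stateAt (k + M * N)) := by
  induction M with
  | zero => simp
  | succ M ih =>
    rw [List.range_succ, List.foldl_append, ih, List.map_append]
    simp only [List.foldl_cons, List.foldl_nil, inner_loop ((N:Int)) ((M:Int)) N (k + M * N) []]
    rw [show k + (M + 1) * N = (k + M * N) + N from by ring]
    simp [List.append_assoc]

theorem take_drop_map_range {A : Type} (f : Nat -> A) (a c T : Nat) (h : a + c <= T) :
    (((List.range T).map f).drop a).take c = (List.range c).map (fun j => f (a + j)) := by
  apply List.ext_getElem
  . simp; omega
  . intro i h1 h2
    simp [List.getElem_take, List.getElem_drop]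

theorem main_pos (n : Int) (hn : 0 < n) : build_magic_square n = build_magic_square_alt n := by
  obtain ⟨N, rfl⟩ : ∃ N : Nat, n = (N:Int) := ⟨n.toNat, (Int.toNat_of_nonneg (by omega)).symm⟩
  rw [build_magic_square_alt, if_neg (by omega : ¬ ((N:Int) ≤ 0))]
  simp only [build_magic_square,
    PySem.List.pyRange_one (0:Int), List.foldl_map, List.map_map]
  norm_num
  rw [show ((['0'], ['0']) : List Char × List Char) = stateAt 0 from rfl, outer_loop N N 0 []]
  simp only [List.nil_append, Nat.zero_add]
  apply List.map_congr_left
  intro r hr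
  have hrN : r < N := List.mem_range.mp hr
  have hNN : ((N:Int) * (N:Int)).toNat = N * N := by
    rw [← Nat.cast_mul, Int.toNat_natCast]
  simp only [Function.comp_apply, hNN]
  rw [show (r:Int) * (N:Int) = ((r * N : Nat) : Int) from by push_cast; ring,
      show ((r:Int) + 1) * (N:Int) = ((r * N + N : Nat) : Int) from by push_cast; ring,
      PySem.List.slice_natCast,
      show r * N + N - r * N = N from by omega]
  have hle : r * N + N ≤ N * N := by
    have := Nat.mul_le_mul_right N (Nat.succ_le_of_lt hrN)
    calc r * N + N = (r + 1) * N := by ring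
    _ ≤ N * N := this
  rw [take_drop_map_range _ _ _ _ hle]
  apply List.map_congr_left
  intro j hj
  have hpar : (2 ∣ ((r * N + j : Nat) : Int)) ↔ ((r * N + j) % 2 = 0) := by omega
  simp only [Function.comp_apply, hpar]
  split_ifs with h <;> push_cast <;> ring

theorem main_nonpos (n : Int) (hn : n ≤ 0) : build_magic_square n = build_magic_square_alt n := by
  simp [build_magic_square, build_magic_square_alt, hn, PySem.List.pyRange_one_eq_nil hn]

-- ===== VERDICT (by name: the statement is the Claim_ definition above) =====
theorem build_magic_square_spec : Claim_equal_build_magic_square := by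
  intro n _
  unfold Spec_build_magic_square
  by_cases h : n ≤ 0
  · exact main_nonpos n h
  · exact main_pos n (by omega)
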